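-- pv_equiv track=rewrite | github.com/myhangshi/plus | pyy/sevenish.py | nth_number
-- ===== SOURCE A (Python) =====
-- def nth_number(n):
--     answer = 0
--     bit_place = 0
--     seven = 1
--
--     while n:
--
--         if n % 2:
--             answer += seven
--
--         n = n // 2
--         seven *= 7
--
--     return answer
-- ===== SOURCE B (Python) =====
-- def nth_number(n):
--     return int(bin(n)[2:], 7)
-- ===== Notes on version B (the rewrite author's own statement) =====
-- stated objective: idiomatic
-- what changed: B replaces A's bit-testing while loop with a running power-of-7 accumulator by a radix reinterpretation: the binary digit string of n is parsed as a base-7 number, so the standard-library conversion does the weighting.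
import Mathlib
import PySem

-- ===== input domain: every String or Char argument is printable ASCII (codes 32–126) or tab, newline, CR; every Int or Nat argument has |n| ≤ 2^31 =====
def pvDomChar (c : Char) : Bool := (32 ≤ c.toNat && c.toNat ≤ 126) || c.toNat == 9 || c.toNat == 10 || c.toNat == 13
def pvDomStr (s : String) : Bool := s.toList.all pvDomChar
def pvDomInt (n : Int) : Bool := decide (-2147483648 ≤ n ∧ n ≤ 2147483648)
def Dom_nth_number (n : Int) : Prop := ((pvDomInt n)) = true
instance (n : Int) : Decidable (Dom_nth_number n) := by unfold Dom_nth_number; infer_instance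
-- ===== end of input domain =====

-- B replaces A's bit-testing loop with a radix reinterpretation (binary digits of n read as a base-7 numeral);
-- A diverges on negative n, so Pre_ restricts to 0 ≤ n.


-- ===== PORT A =====
-- the while loop of A; the `0 < n` guard only makes the recursion total (Python's `while n:`
-- loops forever for n < 0, which Pre_ excludes)
def nthLoopA (n answer seven : Int) : Int :=
  if h : 0 < n then
    nthLoopA (PySem.Int.floordiv n 2)
      (if PySem.Int.mod n 2 ≠ 0 then answer + seven else answer)
      (seven * 7)
  else answer
termination_by n.toNat
decreasing_by
  have h2 : PySem.Int.floordiv n 2 = n / 2 := PySem.Int.floordiv_eq_ediv_of_pos (by omega)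
  simp [h2]; omega

def nth_number (n : Int) : Int := nthLoopA n 0 1

-- ===== PORT B =====
-- bin(n)[2:] as the list of binary digits of n (MSB first), for n > 0
def binDigits : Nat → List Int
  | 0 => []
  | m + 1 => binDigits ((m + 1) / 2) ++ [(((m + 1) % 2 : Nat) : Int)]

-- int(s, 7): parse the digit list in base 7
def nth_number_alt (n : Int) : Int :=
  let ds := if n.toNat = 0 then [(0 : Int)] else binDigits n.toNat
  ds.foldl (fun a d => a * 7 + d) 0

-- ===== PRECONDITION & SPEC =====
-- A's while loop never terminates for n < 0 (n // 2 fixes at -1); Pre_ keeps the meaningful domain.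
def Pre_nth_number (n : Int) : Prop := 0 ≤ n
instance (n : Int) : Decidable (Pre_nth_number n) := by unfold Pre_nth_number; infer_instance
def pvWitness_nth_number : Int := 6

def Spec_nth_number (n : Int) (out : Int) : Prop := out = nth_number_alt n
instance (n : Int) (out : Int) : Decidable (Spec_nth_number n out) := by unfold Spec_nth_number; infer_instance

-- ===== CLAIM (what is proved, stated in full; the proofs are below) =====
def Claim_equal_nth_number : Prop := ∀ (n : Int), Dom_nth_number n → Pre_nth_number n → Spec_nth_number n (nth_number n)

-- ===== LEMMAS AND PROOFS =====

-- the common value: Σ 7^i over the set bits of m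
def V : Nat → Int
  | 0 => 0
  | m + 1 => 7 * V ((m + 1) / 2) + (((m + 1) % 2 : Nat) : Int)

theorem nthLoopA_eq_V : ∀ (m : Nat) (ans seven : Int), nthLoopA (m : Int) ans seven = ans + seven * V m := by
  intro m
  induction m using Nat.strong_induction_on with
  | _ m ih =>
    intro ans seven
    match m with
    | 0 => rw [nthLoopA]; simp [V]
    | k + 1 =>
      rw [nthLoopA]
      have hpos : (0 : Int) < ((k + 1 : Nat) : Int) := by positivity
      have hdiv : PySem.Int.floordiv ((k + 1 : Nat) : Int) 2 = (((k + 1) / 2 : Nat) : Int) :=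
        PySem.Int.floordiv_natCast (k + 1) 2
      have hmod : PySem.Int.mod ((k + 1 : Nat) : Int) 2 = (((k + 1) % 2 : Nat) : Int) :=
        PySem.Int.mod_natCast (k + 1) 2
      rw [dif_pos hpos, hdiv, hmod, ih ((k + 1) / 2) (Nat.div_lt_self (Nat.succ_pos k) (by omega))]
      rw [V]
      rcases Nat.mod_two_eq_zero_or_one (k + 1) with h | h <;> simp [h] <;> ring

theorem fold_binDigits_eq_V : ∀ m, (binDigits m).foldl (fun a d => a * 7 + d) 0 = V m := by
  intro m
  induction m using Nat.strong_induction_on with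
  | _ m ih =>
    match m with
    | 0 => simp [binDigits, V]
    | k + 1 =>
      rw [binDigits, List.foldl_append, ih ((k + 1) / 2) (Nat.div_lt_self (Nat.succ_pos k) (by omega)), V]
      simp; ring

-- ===== VERDICT (by name: the statement is the Claim_ definition above) =====
theorem nth_number_spec : Claim_equal_nth_number := by
  unfold Claim_equal_nth_number
  intro n _ hpre
  unfold Spec_nth_number nth_number nth_number_alt
  have hn : n = (n.toNat : Int) := (Int.toNat_of_nonneg hpre).symm
  rw [hn, nthLoopA_eq_V]
  simp only [Int.toNat_natCast]
  by_cases h0 : n.toNat = 0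
  · rw [if_pos h0, h0]; simp [V]
  · rw [if_neg h0, fold_binDigits_eq_V]; ring
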